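-- pv_equiv track=rewrite | github.com/avaloki108/vulnhuntr2 | vulnhuntr/core/symbolic_exploration.py | _parse_raw_mythril_output
-- ===== SOURCE A (Python) =====
-- from typing import Dict, List, Optional, Set, Any, Tuple
--
-- def _parse_raw_mythril_output(raw_output: str) -> List[Dict[str, Any]]:
--     """Parse raw Mythril output when JSON parsing fails"""
--     issues = []
--
--     # Simple parsing of Mythril text output
--     lines = raw_output.split('\n')
--     current_issue = {}
--
--     for line in lines:
--         line = line.strip()
--
--         if line.startswith("==== "):
--             # New issue
--             if current_issue:
--                 issues.append(current_issue)
--                 current_issue = {}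
--             current_issue["title"] = line.replace("====", "").strip()
--
--         elif line.startswith("Type:"):
--             current_issue["type"] = line.split(":", 1)[1].strip()
--
--         elif line.startswith("Contract:"):
--             current_issue["contract"] = line.split(":", 1)[1].strip()
--
--         elif line.startswith("Function name:"):
--             current_issue["function"] = line.split(":", 1)[1].strip()
--
--         elif line.startswith("PC address:"):
--             current_issue["pc"] = line.split(":", 1)[1].strip()
--
--         elif line.startswith("Description:"):
--             current_issue["description"] = line.split(":", 1)[1].strip()
--
--     # Add final issue
--     if current_issue:
--         issues.append(current_issue)
--
--     return issues
-- ===== SOURCE B (Python) =====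
-- from typing import Dict, List, Any
--
--
-- def _block_dict(block: List[str]) -> Dict[str, Any]:
--     """Build one issue dict from a block of (already-stripped) lines."""
--     d = {}
--     for line in block:
--         if line.startswith("==== "):
--             d["title"] = line.replace("====", "").strip()
--         elif line.startswith("Type:"):
--             d["type"] = line.split(":", 1)[1].strip()
--         elif line.startswith("Contract:"):
--             d["contract"] = line.split(":", 1)[1].strip()
--         elif line.startswith("Function name:"):
--             d["function"] = line.split(":", 1)[1].strip()
--         elif line.startswith("PC address:"):
--             d["pc"] = line.split(":", 1)[1].strip()
--         elif line.startswith("Description:"):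
--             d["description"] = line.split(":", 1)[1].strip()
--     return d
--
--
-- def _parse_raw_mythril_output(raw_output: str) -> List[Dict[str, Any]]:
--     """Parse raw Mythril output when JSON parsing fails"""
--     lines = [l.strip() for l in raw_output.split('\n')]
--     # Partition the lines into blocks: a new block starts at every "==== " line;
--     # anything before the first delimiter forms a (titleless) leading block.
--     blocks = [[]]
--     for line in lines:
--         if line.startswith("==== "):
--             blocks.append([line])
--         else:
--             blocks[-1].append(line)
--     # Map each block to its dict; keep only the non-empty ones.
--     return [d for d in map(_block_dict, blocks) if d]
-- ===== Notes on version B (the rewrite author's own statement) =====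
-- stated objective: alternative
-- what changed: Replaced the single accumulator-threaded loop (issues list + current_issue dict flushed on each '==== ' line) by a partition-then-map: lines are first split into blocks at '==== ' delimiters (titleless leading block kept), then each block is independently mapped to its dict and empty dicts are filtered out.
import Mathlib
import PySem

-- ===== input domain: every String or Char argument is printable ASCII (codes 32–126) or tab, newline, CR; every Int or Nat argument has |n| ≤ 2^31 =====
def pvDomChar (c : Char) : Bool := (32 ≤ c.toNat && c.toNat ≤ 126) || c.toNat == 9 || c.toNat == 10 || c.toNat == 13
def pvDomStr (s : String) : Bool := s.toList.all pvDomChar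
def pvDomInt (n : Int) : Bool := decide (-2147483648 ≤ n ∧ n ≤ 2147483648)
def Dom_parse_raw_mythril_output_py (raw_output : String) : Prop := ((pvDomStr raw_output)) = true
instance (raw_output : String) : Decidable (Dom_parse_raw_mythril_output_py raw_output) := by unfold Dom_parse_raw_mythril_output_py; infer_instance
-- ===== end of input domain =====

-- B replaces A's accumulator-threaded loop by partition-into-blocks-then-map (alternative decomposition, same cost).

-- ===== PORT A =====

-- line.split(":", 1)[1].strip(); the '.getD ""' is unreachable: every caller has checked a prefix containing ':'
def pvTail (line : String) : String :=
  PySem.Str.strip ((PySem.List.pyGet? ((PySem.Str.splitMax? line ":" 1).getD []) 1).getD "")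

-- the body of A's for-loop over lines, state = (issues, current_issue)
def pvStepA (st : List (PySem.Dict String String) × PySem.Dict String String) (l : String) :
    List (PySem.Dict String String) × PySem.Dict String String :=
  let line := PySem.Str.strip l
  if PySem.Str.startswith line "==== " then
    let st := if st.2.items ≠ [] then (st.1 ++ [st.2], PySem.Dict.empty) else st
    (st.1, st.2.insert "title" (PySem.Str.strip (PySem.Str.replace line "====" "")))
  else if PySem.Str.startswith line "Type:" then
    (st.1, st.2.insert "type" (pvTail line))
  else if PySem.Str.startswith line "Contract:" then
    (st.1, st.2.insert "contract" (pvTail line))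
  else if PySem.Str.startswith line "Function name:" then
    (st.1, st.2.insert "function" (pvTail line))
  else if PySem.Str.startswith line "PC address:" then
    (st.1, st.2.insert "pc" (pvTail line))
  else if PySem.Str.startswith line "Description:" then
    (st.1, st.2.insert "description" (pvTail line))
  else st

def parse_raw_mythril_output_py (raw_output : String) : List (List (String × String)) :=
  let lines := (PySem.Str.split? raw_output "\n").getD []
  let res := lines.foldl pvStepA ([], PySem.Dict.empty)
  (if res.2.items ≠ [] then res.1 ++ [res.2] else res.1).map (·.items)

-- ===== PORT B =====

-- _block_dict's loop body: apply one (already-stripped) line's field rule to the dict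
def pvRule (d : PySem.Dict String String) (line : String) : PySem.Dict String String :=
  if PySem.Str.startswith line "==== " then
    d.insert "title" (PySem.Str.strip (PySem.Str.replace line "====" ""))
  else if PySem.Str.startswith line "Type:" then d.insert "type" (pvTail line)
  else if PySem.Str.startswith line "Contract:" then d.insert "contract" (pvTail line)
  else if PySem.Str.startswith line "Function name:" then d.insert "function" (pvTail line)
  else if PySem.Str.startswith line "PC address:" then d.insert "pc" (pvTail line)
  else if PySem.Str.startswith line "Description:" then d.insert "description" (pvTail line)
  else d

def pvBlockDict (block : List String) : PySem.Dict String String :=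
  block.foldl pvRule PySem.Dict.empty

-- the partitioning loop body: start a new block at a delimiter, else append to the last block
def pvAddLine (bs : List (List String)) (line : String) : List (List String) :=
  if PySem.Str.startswith line "==== " then bs ++ [[line]]
  else bs.dropLast ++ [((bs.getLast?).getD []) ++ [line]]

def parse_raw_mythril_output_py_alt (raw_output : String) : List (List (String × String)) :=
  let lines := ((PySem.Str.split? raw_output "\n").getD []).map PySem.Str.strip
  let blocks := lines.foldl pvAddLine [[]]
  (((blocks.map pvBlockDict).filter (fun d => !d.items.isEmpty)).map (·.items))

-- ===== PRECONDITION & SPEC =====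
def Spec_parse_raw_mythril_output_py (raw_output : String) (out : List (List (String × String))) : Prop := out = parse_raw_mythril_output_py_alt raw_output
instance (raw_output : String) (out : List (List (String × String))) : Decidable (Spec_parse_raw_mythril_output_py raw_output out) := by unfold Spec_parse_raw_mythril_output_py; infer_instance

-- ===== CLAIM (what is proved, stated in full; the proofs are below) =====
def Claim_equal_parse_raw_mythril_output_py : Prop := ∀ (raw_output : String), Dom_parse_raw_mythril_output_py raw_output → Spec_parse_raw_mythril_output_py raw_output (parse_raw_mythril_output_py raw_output)

-- ===== LEMMAS AND PROOFS =====

-- A's loop body on an already-stripped line (pvStepA st l = pvCoreA st (strip l) by rfl)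
def pvCoreA (st : List (PySem.Dict String String) × PySem.Dict String String) (line : String) :
    List (PySem.Dict String String) × PySem.Dict String String :=
  if PySem.Str.startswith line "==== " then
    let st := if st.2.items ≠ [] then (st.1 ++ [st.2], PySem.Dict.empty) else st
    (st.1, st.2.insert "title" (PySem.Str.strip (PySem.Str.replace line "====" "")))
  else if PySem.Str.startswith line "Type:" then
    (st.1, st.2.insert "type" (pvTail line))
  else if PySem.Str.startswith line "Contract:" then
    (st.1, st.2.insert "contract" (pvTail line))
  else if PySem.Str.startswith line "Function name:" then
    (st.1, st.2.insert "function" (pvTail line))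
  else if PySem.Str.startswith line "PC address:" then
    (st.1, st.2.insert "pc" (pvTail line))
  else if PySem.Str.startswith line "Description:" then
    (st.1, st.2.insert "description" (pvTail line))
  else st

-- flush of A's final state
def pvFinish (st : List (PySem.Dict String String) × PySem.Dict String String) :
    List (PySem.Dict String String) :=
  if st.2.items ≠ [] then st.1 ++ [st.2] else st.1

-- B's per-block map + nonempty filter
def pvF (bs : List (List String)) : List (PySem.Dict String String) :=
  (bs.map pvBlockDict).filter (fun d => !d.items.isEmpty)

theorem pvF_append (xs ys : List (List String)) : pvF (xs ++ ys) = pvF xs ++ pvF ys := by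
  simp [pvF]

-- the partition loop only touches the last block: a proper prefix passes through
theorem pvAddLine_prefix (ls : List String) (bs : List (List String)) (b : List String) :
    ls.foldl pvAddLine (bs ++ [b]) = bs ++ ls.foldl pvAddLine [b] := by
  induction ls generalizing bs b with
  | nil => rfl
  | cons l ls ih =>
    simp only [List.foldl_cons, pvAddLine]
    by_cases h : PySem.Str.startswith l "==== " = true
    · rw [if_pos h, if_pos h, ih (bs ++ [b]) [l], ih [b] [l]]
      simp
    · rw [if_neg h, if_neg h, List.dropLast_concat, List.getLast?_concat]
      simp only [show ([b] : List (List String)).dropLast = [] from rfl,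
        show ([b] : List (List String)).getLast? = some b from rfl, Option.getD_some,
        List.nil_append]
      exact ih bs (b ++ [l])

-- pvCoreA rephrased: flush (if at a delimiter), then apply B's per-line rule
theorem pvCoreA_eq (st : List (PySem.Dict String String) × PySem.Dict String String)
    (line : String) :
    pvCoreA st line =
      (if PySem.Str.startswith line "==== " then
        (pvFinish st, pvRule PySem.Dict.empty line)
      else (st.1, pvRule st.2 line)) := by
  simp only [pvCoreA, pvRule, pvFinish]
  by_cases h : PySem.Str.startswith line "==== " = true
  · rw [if_pos h, if_pos h]
    split_ifs with hc
    · rfl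
    · have he : st.2 = PySem.Dict.empty := by
        apply PySem.Dict.ext
        simpa using not_not.mp hc
      rw [he]
  · rw [if_neg h, if_neg h]
    split_ifs <;> rfl

-- blockDict of a one-longer block
theorem pvBlockDict_concat (b : List String) (l : String) :
    pvBlockDict (b ++ [l]) = pvRule (pvBlockDict b) l := by
  simp [pvBlockDict]

-- main invariant: A's loop from (is, dict of the partial block b) over the remaining
-- stripped lines, then flushed, equals is ++ B's blockwise result continued from block b
theorem pvMain (ls : List String) (is : List (PySem.Dict String String)) (b : List String) :
    pvFinish (ls.foldl pvCoreA (is, pvBlockDict b)) =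
      is ++ pvF (ls.foldl pvAddLine [b]) := by
  induction ls generalizing is b with
  | nil =>
    by_cases hbe : (pvBlockDict b).items = [] <;>
      simp [pvFinish, pvF, List.filter, hbe]
  | cons l ls ih =>
    rw [List.foldl_cons, List.foldl_cons, pvCoreA_eq]
    simp only [pvAddLine]
    by_cases h : PySem.Str.startswith l "==== " = true
    · rw [if_pos h, if_pos h]
      have hb : pvRule PySem.Dict.empty l = pvBlockDict [l] := rfl
      rw [hb, ih (pvFinish (is, pvBlockDict b)) [l],
        pvAddLine_prefix ls [b] [l], pvF_append, ← List.append_assoc]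
      congr 1
      by_cases hbe : (pvBlockDict b).items = [] <;>
        simp [pvFinish, pvF, List.filter, hbe]
    · rw [if_neg h, if_neg h, ← pvBlockDict_concat, ih is (b ++ [l])]
      simp

theorem pvA_eq (raw : String) :
    parse_raw_mythril_output_py raw =
      (pvFinish ((((PySem.Str.split? raw "\n").getD []).map PySem.Str.strip).foldl pvCoreA
        ([], pvBlockDict []))).map (·.items) := by
  show (pvFinish (((PySem.Str.split? raw "\n").getD []).foldl pvStepA
    ([], PySem.Dict.empty))).map (·.items) = _
  rw [List.foldl_map]
  rfl

theorem pvB_eq (raw : String) :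
    parse_raw_mythril_output_py_alt raw =
      (pvF ((((PySem.Str.split? raw "\n").getD []).map PySem.Str.strip).foldl pvAddLine
        [[]])).map (·.items) := rfl

-- ===== VERDICT (by name: the statement is the Claim_ definition above) =====
theorem parse_raw_mythril_output_py_spec : Claim_equal_parse_raw_mythril_output_py := by
  intro raw _
  show parse_raw_mythril_output_py raw = parse_raw_mythril_output_py_alt raw
  rw [pvA_eq, pvB_eq, pvMain, List.nil_append]
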